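-- pv_equiv track=rewrite | github.com/SzymonIwaniuk/wdi-2024-2025 | Zestaw2/zad86.py | podciag
-- ===== SOURCE A (Python) =====
-- def same_digits(a, b):
--     T = [0 for _ in range(10)]
--
--     while a > 0:
--         if T[a % 10] == 0:
--             T[a % 10] += 1
--         a //= 10
--
--     #end while
--
--     while b > 0:
--         if T[b % 10] != 0:
--             T[b % 10] -= 1
--
--         if T[b % 10] < 0: return False
--
--         b //= 10
--
--     return sum(T) == 0
--
-- def zamien_sys(x):
--     result = 0
--
--     while x > 0:
--         result = result * 10 + x % 4
--         x //= 4
--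
--     return result
--
-- def podciag(T):
--     N = len(T)
--     result = 0
--
--     for i in range(1, N):
--         n1 = zamien_sys(T[i])
--         cnt = 0
--
--         for j in range(i):
--             n2 = zamien_sys(T[j])
--
--             if same_digits(n1, n2):
--                 if cnt == 0:
--                     cnt += 2
--                 else:
--                     cnt += 1
--         #end for
--
--         if cnt > result:
--             result = cnt
--     # end for
--
--     return result
-- ===== SOURCE B (Python) =====
-- def podciag(T):
--     # For each element, signature = set of base-4 digits of x after stripping trailing
--     # base-4 zeros (matches what A's zamien_sys + same_digits compare), as a 4-bit mask.
--     # Keep a histogram of the 16 masks over the prefix; for each i sum counts of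
--     # superset masks instead of rescanning all earlier elements.
--     def sig(x):
--         if x <= 0:
--             return 0
--         while x % 4 == 0:
--             x //= 4
--         m = 0
--         while x > 0:
--             m |= 1 << (x % 4)
--             x //= 4
--         return m
--
--     counts = [0] * 16
--     best = 0
--     for x in T:
--         m = sig(x)
--         k = sum(counts[s] for s in range(16) if m & s == m)
--         if k > 0 and k + 1 > best:
--             best = k + 1
--         counts[m] += 1
--     return best
-- ===== Notes on version B (the rewrite author's own statement) =====
-- stated objective: faster
-- what changed: A compares every pair (i, j<i) by rebuilding decimal digit multisets of the base-4 conversions (O(N^2*D)); B precomputes one 4-bit base-4 digit-set mask per element and keeps a 16-bucket histogram of masks over the prefix, answering each element's count by summing the superset buckets (O(N*(16+D))).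
import Mathlib
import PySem

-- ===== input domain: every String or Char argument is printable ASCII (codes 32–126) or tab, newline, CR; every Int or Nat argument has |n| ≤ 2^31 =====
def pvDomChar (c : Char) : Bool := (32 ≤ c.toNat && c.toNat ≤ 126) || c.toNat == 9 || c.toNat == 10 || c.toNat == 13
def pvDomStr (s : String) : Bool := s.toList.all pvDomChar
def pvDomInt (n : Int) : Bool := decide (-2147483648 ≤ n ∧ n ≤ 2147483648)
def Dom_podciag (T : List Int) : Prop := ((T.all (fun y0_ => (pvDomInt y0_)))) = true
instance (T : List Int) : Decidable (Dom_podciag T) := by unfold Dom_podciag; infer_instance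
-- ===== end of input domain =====

-- B replaces A's quadratic all-earlier-pairs digit-multiset comparison by precomputed 4-bit
-- base-4 digit-set masks and a 16-bucket prefix histogram summed over superset masks (objective: faster).


-- termination helpers for the 'while x > 0: … x //= b' loops of both ports
theorem pv_div10_lt (x : Int) (h : 0 < x) : (PySem.Int.floordiv x 10).toNat < x.toNat := by
  rw [PySem.Int.floordiv_eq_ediv_of_pos (by norm_num)]; omega

theorem pv_div4_lt (x : Int) (h : 0 < x) : (PySem.Int.floordiv x 4).toNat < x.toNat := by
  rw [PySem.Int.floordiv_eq_ediv_of_pos (by norm_num)]; omega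

-- ===== PORT A =====
-- first while of same_digits: mark the decimal digits of a in T
-- (indices a % 10 ∈ [0, 10) are always in range for the length-10 list, so pyGetD's default never fires)
def sdLoop1 (a : Int) (T : List Int) : List Int :=
  if h : 0 < a then
    let d := PySem.Int.mod a 10
    let t := PySem.List.pyGetD T d 0
    let T' := if t == 0 then PySem.List.pySetD T d (t + 1) else T
    sdLoop1 (PySem.Int.floordiv a 10) T'
  else T
termination_by a.toNat
decreasing_by exact pv_div10_lt a h

-- second while of same_digits (early 'return False' kept); after the loop: 'return sum(T) == 0'
def sdLoop2 (b : Int) (T : List Int) : Bool :=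
  if h : 0 < b then
    let d := PySem.Int.mod b 10
    let t := PySem.List.pyGetD T d 0
    let T' := if t != 0 then PySem.List.pySetD T d (t - 1) else T
    if PySem.List.pyGetD T' d 0 < 0 then false
    else sdLoop2 (PySem.Int.floordiv b 10) T'
  else T.sum == 0
termination_by b.toNat
decreasing_by exact pv_div10_lt b h

def same_digits (a b : Int) : Bool :=
  let T := (PySem.List.pyRange 0 10 1).map (fun _ => (0 : Int))
  sdLoop2 b (sdLoop1 a T)

def zsLoop (x result : Int) : Int :=
  if h : 0 < x then zsLoop (PySem.Int.floordiv x 4) (result * 10 + PySem.Int.mod x 4)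
  else result
termination_by x.toNat
decreasing_by exact pv_div4_lt x h

def zamien_sys (x : Int) : Int := zsLoop x 0

def podciag (T : List Int) : Int :=
  let N : Int := T.length
  (PySem.List.pyRange 1 N 1).foldl (fun result i =>
    let n1 := zamien_sys (PySem.List.pyGetD T i 0)
    let cnt := (PySem.List.pyRange 0 i 1).foldl (fun cnt j =>
      let n2 := zamien_sys (PySem.List.pyGetD T j 0)
      if same_digits n1 n2 then (if cnt == 0 then cnt + 2 else cnt + 1) else cnt) 0
    if cnt > result then cnt else result) 0

-- ===== PORT B =====
-- 'while x % 4 == 0: x //= 4' (only ever entered with 0 < x; the guard keeps the recursion total)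
def sigStrip (x : Int) : Int :=
  if h : 0 < x ∧ PySem.Int.mod x 4 = 0 then sigStrip (PySem.Int.floordiv x 4) else x
termination_by x.toNat
decreasing_by exact pv_div4_lt x h.1

-- 'while x > 0: m |= 1 << (x % 4); x //= 4'  (x % 4 ∈ [0, 4), so .toNat is exact)
def sigLoop (x m : Int) : Int :=
  if h : 0 < x then
    sigLoop (PySem.Int.floordiv x 4) (PySem.Int.bor m ((1 : Int) <<< (PySem.Int.mod x 4).toNat))
  else m
termination_by x.toNat
decreasing_by exact pv_div4_lt x h

def sigB (x : Int) : Int := if x ≤ 0 then 0 else sigLoop (sigStrip x) 0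

def podciag_alt (T : List Int) : Int :=
  (T.foldl (fun (st : List Int × Int) x =>
      let counts := st.1
      let best := st.2
      let m := sigB x
      let k := (PySem.List.pyRange 0 16 1).foldl (fun k s =>
        if PySem.Int.band m s == m then k + PySem.List.pyGetD counts s 0 else k) 0
      let best' := if 0 < k ∧ k + 1 > best then k + 1 else best
      (PySem.List.pySetD counts m (PySem.List.pyGetD counts m 0 + 1), best'))
    (List.replicate 16 (0 : Int), 0)).2

-- ===== PRECONDITION & SPEC =====
def Spec_podciag (T : List Int) (out : Int) : Prop := out = podciag_alt T
instance (T : List Int) (out : Int) : Decidable (Spec_podciag T out) := by unfold Spec_podciag; infer_instance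

-- ===== CLAIM (what is proved, stated in full; the proofs are below) =====
def Claim_equal_podciag : Prop := ∀ (T : List Int), Dom_podciag T → Spec_podciag T (podciag T)

-- ===== LEMMAS AND PROOFS =====

-- decimal digit set of n (digits of |n| read by n % 10, n //= 10; empty for n ≤ 0)
def dsetF (n : Int) : Finset ℕ :=
  if h : 0 < n then insert (PySem.Int.mod n 10).toNat (dsetF (PySem.Int.floordiv n 10)) else ∅
termination_by n.toNat
decreasing_by exact pv_div10_lt n h

-- base-4 digit set
def qsetF (n : Int) : Finset ℕ :=
  if h : 0 < n then insert (PySem.Int.mod n 4).toNat (qsetF (PySem.Int.floordiv n 4)) else ∅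
termination_by n.toNat
decreasing_by exact pv_div4_lt n h

-- base-4 digit set after stripping trailing base-4 zeros
def ssetF (n : Int) : Finset ℕ :=
  if h : 0 < n then
    (if PySem.Int.mod n 4 = 0 then ssetF (PySem.Int.floordiv n 4) else qsetF n)
  else ∅
termination_by n.toNat
decreasing_by exact pv_div4_lt n h

def indL (S : Finset ℕ) : List Int := (List.range 10).map (fun i => if i ∈ S then 1 else 0)

def maskOf (S : Finset ℕ) : Int := ∑ d ∈ S, (1 : Int) <<< d

def matches_ (pre : List Int) (x : Int) : ℕ := pre.countP (fun y => decide (ssetF x ⊆ ssetF y))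

def gInt (k : ℕ) : Int := if k = 0 then 0 else (k : Int) + 1

def pvRef : List Int → List Int → Int → Int
  | _,   [],        best => best
  | pre, x :: rest, best =>
      let k := matches_ pre x
      pvRef (pre ++ [x]) rest (if 0 < (k : Int) ∧ (k : Int) + 1 > best then (k : Int) + 1 else best)

def histo (pre : List Int) : List Int :=
  (List.range 16).map (fun (s : ℕ) => (pre.countP (fun y => sigB y == ((s : ℕ) : Int)) : Int))


-- ---- arithmetic / unfolding helpers ----

theorem dsetF_nonpos (n : Int) (h : n ≤ 0) : dsetF n = ∅ := by
  rw [dsetF, dif_neg (by omega)]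

theorem dsetF_pos (n : Int) (h : 0 < n) :
    dsetF n = insert (PySem.Int.mod n 10).toNat (dsetF (PySem.Int.floordiv n 10)) := by
  rw [dsetF, dif_pos h]

theorem qsetF_nonpos (n : Int) (h : n ≤ 0) : qsetF n = ∅ := by
  rw [qsetF, dif_neg (by omega)]

theorem qsetF_pos (n : Int) (h : 0 < n) :
    qsetF n = insert (PySem.Int.mod n 4).toNat (qsetF (PySem.Int.floordiv n 4)) := by
  rw [qsetF, dif_pos h]

theorem ssetF_nonpos (n : Int) (h : n ≤ 0) : ssetF n = ∅ := by
  rw [ssetF, dif_neg (by omega)]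

theorem ssetF_pos_zero (n : Int) (h : 0 < n) (hm : PySem.Int.mod n 4 = 0) :
    ssetF n = ssetF (PySem.Int.floordiv n 4) := by
  rw [ssetF, dif_pos h, if_pos hm]

theorem ssetF_pos_ne (n : Int) (h : 0 < n) (hm : PySem.Int.mod n 4 ≠ 0) :
    ssetF n = qsetF n := by
  rw [ssetF, dif_pos h, if_neg hm]

theorem dsetF_sub (n : Int) : dsetF n ⊆ Finset.range 10 := by
  have H : ∀ k : ℕ, ∀ n : Int, n.toNat = k → dsetF n ⊆ Finset.range 10 := by
    intro k
    induction k using Nat.strong_induction_on with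
    | _ k ih =>
      intro n hn
      by_cases h : 0 < n
      · rw [dsetF_pos n h]
        intro d hd
        rcases Finset.mem_insert.mp hd with h1 | h1
        · subst h1
          have h2 := PySem.Int.mod_lt n (b := 10) (by norm_num)
          simp only [Finset.mem_range]; omega
        · exact ih _ (by have := pv_div10_lt n h; omega) _ rfl h1
      · rw [dsetF_nonpos n (by omega)]; intro d hd; simp at hd
  exact H _ n rfl

theorem qsetF_sub (n : Int) : qsetF n ⊆ Finset.range 4 := by
  have H : ∀ k : ℕ, ∀ n : Int, n.toNat = k → qsetF n ⊆ Finset.range 4 := by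
    intro k
    induction k using Nat.strong_induction_on with
    | _ k ih =>
      intro n hn
      by_cases h : 0 < n
      · rw [qsetF_pos n h]
        intro d hd
        rcases Finset.mem_insert.mp hd with h1 | h1
        · subst h1
          have h2 := PySem.Int.mod_lt n (b := 4) (by norm_num)
          simp only [Finset.mem_range]; omega
        · exact ih _ (by have := pv_div4_lt n h; omega) _ rfl h1
      · rw [qsetF_nonpos n (by omega)]; intro d hd; simp at hd
  exact H _ n rfl

theorem ssetF_sub (n : Int) : ssetF n ⊆ Finset.range 4 := by
  have H : ∀ k : ℕ, ∀ n : Int, n.toNat = k → ssetF n ⊆ Finset.range 4 := by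
    intro k
    induction k using Nat.strong_induction_on with
    | _ k ih =>
      intro n hn
      by_cases h : 0 < n
      · by_cases hm : PySem.Int.mod n 4 = 0
        · rw [ssetF_pos_zero n h hm]
          exact ih _ (by have := pv_div4_lt n h; omega) _ rfl
        · rw [ssetF_pos_ne n h hm]; exact qsetF_sub n
      · rw [ssetF_nonpos n (by omega)]; intro d hd; simp at hd
  exact H _ n rfl

-- ---- pointwise facts about the length-10 indicator list ----

theorem IND1 (S : Finset ℕ) (d : ℕ) (hd : d < 10) :
    PySem.List.pyGetD (indL S) (d : Int) 0 = if d ∈ S then 1 else 0 := by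
  rw [PySem.List.pyGetD_eq_getElem _ 0 (by omega) (by simp [indL]; omega)]
  simp [indL]

theorem IND2 (S : Finset ℕ) (d : ℕ) (hd : d < 10) :
    PySem.List.pySetD (indL S) (d : Int) 1 = indL (insert d S) := by
  rw [PySem.List.pySetD_of_nonneg _ _ (by omega)]
  apply List.ext_getElem
  · simp [indL]
  · intro k hk hk'
    simp only [indL, List.length_set, List.length_map, List.length_range] at hk hk'
    simp only [indL, List.getElem_set, List.getElem_map, List.getElem_range, Int.toNat_natCast]
    by_cases hkd : d = k
    · subst hkd; simp
    · rw [if_neg hkd]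
      have hkd' : ¬ k = d := fun hh => hkd hh.symm
      simp [Finset.mem_insert, hkd']

theorem IND3 (S : Finset ℕ) (d : ℕ) (hd : d < 10) :
    PySem.List.pySetD (indL S) (d : Int) 0 = indL (S.erase d) := by
  rw [PySem.List.pySetD_of_nonneg _ _ (by omega)]
  apply List.ext_getElem
  · simp [indL]
  · intro k hk hk'
    simp only [indL, List.length_set, List.length_map, List.length_range] at hk hk'
    simp only [indL, List.getElem_set, List.getElem_map, List.getElem_range, Int.toNat_natCast]
    by_cases hkd : d = k
    · subst hkd; simp
    · rw [if_neg hkd]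
      have hkd' : ¬ k = d := fun hh => hkd hh.symm
      simp [Finset.mem_erase, hkd']

theorem IND4 (S : Finset ℕ) (hS : S ⊆ Finset.range 10) :
    ((indL S).sum == 0) = decide (S = ∅) := by
  have hsum : (indL S).sum = (S.card : Int) := by
    have h1 : (indL S).sum = ∑ i ∈ Finset.range 10, (if i ∈ S then (1 : Int) else 0) := rfl
    rw [h1, Finset.sum_ite_mem, Finset.inter_eq_right.mpr hS]
    simp
  rw [hsum]
  by_cases h0 : S = ∅
  · subst h0; simp
  · have hc : S.card ≠ 0 := by simpa [Finset.card_eq_zero] using h0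
    rw [show decide (S = ∅) = false from by simp [h0]]
    simp only [beq_eq_false_iff_ne, ne_eq]
    omega

-- ---- same_digits computes decimal-digit-set inclusion ----

theorem sdLoop1_eq (a : Int) : ∀ S, S ⊆ Finset.range 10 → sdLoop1 a (indL S) = indL (S ∪ dsetF a) := by
  have H : ∀ k : ℕ, ∀ a : Int, a.toNat = k → ∀ S, S ⊆ Finset.range 10 →
      sdLoop1 a (indL S) = indL (S ∪ dsetF a) := by
    intro k
    induction k using Nat.strong_induction_on with
    | _ k ih =>
      intro a hk S hS
      by_cases h : 0 < a
      · rw [sdLoop1, dif_pos h]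
        have hd0 := PySem.Int.mod_nonneg a (b := 10) (by norm_num)
        have hd1 := PySem.Int.mod_lt a (b := 10) (by norm_num)
        set d := PySem.Int.mod a 10 with hd
        have hdn : d = ((d.toNat : ℕ) : Int) := by omega
        have hdr : d.toNat < 10 := by omega
        have hS' : insert d.toNat S ⊆ Finset.range 10 := by
          intro y hy
          rcases Finset.mem_insert.mp hy with h1 | h1
          · subst h1; simp only [Finset.mem_range]; omega
          · exact hS h1
        have hrec := ih (PySem.Int.floordiv a 10).toNat (by have := pv_div10_lt a h; omega) _ rfl
        by_cases hmem : d.toNat ∈ S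
        · have hget : PySem.List.pyGetD (indL S) d 0 = 1 := by
            rw [hdn]
            rw [IND1 S d.toNat hdr, if_pos hmem]
          simp only [hget]
          rw [if_neg (show ¬ (((1 : Int) == 0) = true) from by decide)]
          rw [hrec S hS, dsetF_pos a h, ← hd]
          congr 1
          rw [Finset.union_insert, Finset.insert_eq_self.mpr (Finset.mem_union_left _ hmem)]
        · have hget : PySem.List.pyGetD (indL S) d 0 = 0 := by
            rw [hdn]
            rw [IND1 S d.toNat hdr, if_neg hmem]
          have hset : PySem.List.pySetD (indL S) d (0 + 1) = indL (insert d.toNat S) := by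
            norm_num
            rw [hdn]
            exact IND2 S d.toNat hdr
          simp only [hget]
          rw [if_pos (show (((0 : Int) == 0) = true) from by decide)]
          rw [hset, hrec _ hS', dsetF_pos a h, ← hd]
          congr 1
          rw [Finset.insert_union, Finset.union_insert]
      · rw [sdLoop1, dif_neg (by omega), dsetF_nonpos a (by omega), Finset.union_empty]
  exact H _ a rfl

theorem sdLoop2_eq (b : Int) : ∀ S, S ⊆ Finset.range 10 →
    sdLoop2 b (indL S) = decide (S \ dsetF b = ∅) := by
  have H : ∀ k : ℕ, ∀ b : Int, b.toNat = k → ∀ S, S ⊆ Finset.range 10 →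
      sdLoop2 b (indL S) = decide (S \ dsetF b = ∅) := by
    intro k
    induction k using Nat.strong_induction_on with
    | _ k ih =>
      intro b hk S hS
      by_cases h : 0 < b
      · rw [sdLoop2, dif_pos h]
        have hd0 := PySem.Int.mod_nonneg b (b := 10) (by norm_num)
        have hd1 := PySem.Int.mod_lt b (b := 10) (by norm_num)
        set d := PySem.Int.mod b 10 with hd
        have hdn : d = ((d.toNat : ℕ) : Int) := by omega
        have hdr : d.toNat < 10 := by omega
        have hS' : S.erase d.toNat ⊆ Finset.range 10 := (Finset.erase_subset _ _).trans hS
        have hrec := ih (PySem.Int.floordiv b 10).toNat (by have := pv_div10_lt b h; omega) _ rfl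
        have hsplit : S \ dsetF b = (S.erase d.toNat) \ dsetF (PySem.Int.floordiv b 10) := by
          rw [dsetF_pos b h, ← hd]
          ext y
          simp only [Finset.mem_sdiff, Finset.mem_insert, Finset.mem_erase, ne_eq]
          tauto
        by_cases hmem : d.toNat ∈ S
        · have hget : PySem.List.pyGetD (indL S) d 0 = 1 := by
            rw [hdn]
            rw [IND1 S d.toNat hdr, if_pos hmem]
          have hset : PySem.List.pySetD (indL S) d (1 - 1) = indL (S.erase d.toNat) := by
            norm_num
            rw [hdn]
            exact IND3 S d.toNat hdr
          have hgetE : PySem.List.pyGetD (indL (S.erase d.toNat)) d 0 = 0 := by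
            have h1 := IND1 (S.erase d.toNat) d.toNat hdr
            rw [if_neg (by simp [Finset.mem_erase])] at h1
            rw [hdn]
            exact h1
          simp only [hget]
          rw [if_pos (show (((1 : Int) != 0) = true) from by decide)]
          rw [hset]
          simp only [hgetE]
          rw [if_neg (show ¬ ((0 : Int) < 0) from by decide)]
          rw [hrec _ hS', hsplit]
        · have hget : PySem.List.pyGetD (indL S) d 0 = 0 := by
            rw [hdn]
            rw [IND1 S d.toNat hdr, if_neg hmem]
          simp only [hget]
          rw [if_neg (show ¬ (((0 : Int) != 0) = true) from by decide)]
          rw [hget]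
          rw [if_neg (show ¬ ((0 : Int) < 0) from by decide)]
          rw [hrec _ hS, hsplit, Finset.erase_eq_of_notMem hmem]
      · rw [sdLoop2, dif_neg (by omega), dsetF_nonpos b (by omega), Finset.sdiff_empty]
        exact IND4 S hS
  exact H _ b rfl

theorem indL_empty : ((PySem.List.pyRange 0 10 1).map (fun _ => (0 : Int))) = indL ∅ := by decide

theorem same_digits_eq (a b : Int) : same_digits a b = decide (dsetF a ⊆ dsetF b) := by
  show sdLoop2 b (sdLoop1 a ((PySem.List.pyRange 0 10 1).map (fun _ => (0 : Int)))) = _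
  rw [indL_empty, sdLoop1_eq a ∅ (by intro y hy; simp at hy), Finset.empty_union,
      sdLoop2_eq b _ (dsetF_sub a)]
  simp [Finset.sdiff_eq_empty_iff_subset]

-- ---- zamien_sys produces exactly the stripped base-4 digit set ----

theorem dsetF_mul10 (r d : Int) (hr : 0 ≤ r) (hd0 : 0 ≤ d) (hd : d < 10) (hpos : 0 < r * 10 + d) :
    dsetF (r * 10 + d) = insert d.toNat (dsetF r) := by
  have h1 : PySem.Int.mod (r * 10 + d) 10 = d := by
    rw [PySem.Int.mod_eq_emod_of_pos (by norm_num)]; omega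
  have h2 : PySem.Int.floordiv (r * 10 + d) 10 = r := by
    rw [PySem.Int.floordiv_eq_ediv_of_pos (by norm_num)]; omega
  rw [dsetF_pos _ hpos, h1, h2]

theorem zsLoop_dset (x : Int) : ∀ r, 0 ≤ r →
    dsetF (zsLoop x r) = dsetF r ∪ (if 0 < r then qsetF x else ssetF x) := by
  have H : ∀ k : ℕ, ∀ x : Int, x.toNat = k → ∀ r, 0 ≤ r →
      dsetF (zsLoop x r) = dsetF r ∪ (if 0 < r then qsetF x else ssetF x) := by
    intro k
    induction k using Nat.strong_induction_on with
    | _ k ih =>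
      intro x hk r hr
      by_cases h : 0 < x
      · rw [zsLoop, dif_pos h]
        have hd0 := PySem.Int.mod_nonneg x (b := 4) (by norm_num)
        have hd1 := PySem.Int.mod_lt x (b := 4) (by norm_num)
        set d := PySem.Int.mod x 4 with hd
        have hrec := ih (PySem.Int.floordiv x 4).toNat (by have := pv_div4_lt x h; omega)
          _ rfl (r * 10 + d) (by omega)
        by_cases hrp : 0 < r
        · have hn : 0 < r * 10 + d := by omega
          rw [hrec, if_pos hn, if_pos hrp, dsetF_mul10 r d (by omega) hd0 (by omega) hn,
              qsetF_pos x h, ← hd, Finset.insert_union, Finset.union_insert]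
        · have hr0 : r = 0 := by omega
          subst hr0
          by_cases hdp : 0 < d
          · have hn : 0 < 0 * 10 + d := by omega
            rw [hrec, if_pos hn, dsetF_mul10 0 d (by omega) hd0 (by omega) hn,
                dsetF_nonpos 0 (by omega)]
            simp only [lt_irrefl, if_false]
            rw [ssetF_pos_ne x h (by omega), qsetF_pos x h, ← hd]
            simp
          · have hd0' : d = 0 := by omega
            have hn : (0 : Int) * 10 + d = 0 := by omega
            rw [hn] at hrec ⊢
            rw [hrec, if_neg (by omega), dsetF_nonpos 0 (by omega)]
            simp only [lt_irrefl, if_false, Finset.empty_union]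
            rw [ssetF_pos_zero x h (by omega)]
      · rw [zsLoop, dif_neg (by omega), qsetF_nonpos x (by omega), ssetF_nonpos x (by omega)]
        simp
  exact H _ x rfl

theorem zamien_dset (x : Int) : dsetF (zamien_sys x) = ssetF x := by
  show dsetF (zsLoop x 0) = ssetF x
  rw [zsLoop_dset x 0 (by omega), dsetF_nonpos 0 (by omega)]
  simp

theorem pred_eq (x y : Int) :
    same_digits (zamien_sys x) (zamien_sys y) = decide (ssetF x ⊆ ssetF y) := by
  rw [same_digits_eq, zamien_dset, zamien_dset]

-- ---- the 16 masks, decided over the subsets of range 4 ----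

theorem MSK1 : ∀ S ∈ (Finset.range 4).powerset, ∀ d ∈ Finset.range 4,
    PySem.Int.bor (maskOf S) ((1 : Int) <<< d) = maskOf (insert d S) := by decide

theorem MSK2 : ∀ S ∈ (Finset.range 4).powerset, ∀ T ∈ (Finset.range 4).powerset,
    (PySem.Int.band (maskOf S) (maskOf T) == maskOf S) = decide (S ⊆ T) := by decide

theorem MSK3 : ∀ S ∈ (Finset.range 4).powerset, 0 ≤ maskOf S ∧ maskOf S < 16 := by decide

theorem MSK4 : ∀ S ∈ (Finset.range 4).powerset, ∀ T ∈ (Finset.range 4).powerset,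
    ((PySem.List.pyRange 0 16 1).map (fun s =>
      if PySem.Int.band (maskOf S) s == maskOf S then (if maskOf T == s then (1 : Int) else 0) else 0)).sum
      = (if PySem.Int.band (maskOf S) (maskOf T) == maskOf S then 1 else 0) := by decide

-- ---- sigB computes maskOf (ssetF ·) ----

theorem sigStrip_facts (x : Int) (h : 0 < x) :
    ssetF (sigStrip x) = ssetF x ∧ 0 < sigStrip x ∧ PySem.Int.mod (sigStrip x) 4 ≠ 0 := by
  have H : ∀ k : ℕ, ∀ x : Int, x.toNat = k → 0 < x →
      ssetF (sigStrip x) = ssetF x ∧ 0 < sigStrip x ∧ PySem.Int.mod (sigStrip x) 4 ≠ 0 := by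
    intro k
    induction k using Nat.strong_induction_on with
    | _ k ih =>
      intro x hk h
      by_cases hm : PySem.Int.mod x 4 = 0
      · rw [sigStrip, dif_pos ⟨h, hm⟩]
        have hq : 0 < PySem.Int.floordiv x 4 := by
          rw [PySem.Int.floordiv_eq_ediv_of_pos (by norm_num)]
          rw [PySem.Int.mod_eq_emod_of_pos (by norm_num)] at hm
          omega
        have := ih (PySem.Int.floordiv x 4).toNat (by have := pv_div4_lt x h; omega) _ rfl hq
        exact ⟨by rw [this.1, ssetF_pos_zero x h hm], this.2⟩
      · rw [sigStrip, dif_neg (by tauto)]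
        exact ⟨rfl, h, hm⟩
  exact H _ x rfl h

theorem sigLoop_mask (x : Int) : ∀ S, S ⊆ Finset.range 4 →
    sigLoop x (maskOf S) = maskOf (S ∪ qsetF x) := by
  have H : ∀ k : ℕ, ∀ x : Int, x.toNat = k → ∀ S, S ⊆ Finset.range 4 →
      sigLoop x (maskOf S) = maskOf (S ∪ qsetF x) := by
    intro k
    induction k using Nat.strong_induction_on with
    | _ k ih =>
      intro x hk S hS
      by_cases h : 0 < x
      · rw [sigLoop, dif_pos h]
        have hd0 := PySem.Int.mod_nonneg x (b := 4) (by norm_num)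
        have hd1 := PySem.Int.mod_lt x (b := 4) (by norm_num)
        set d := PySem.Int.mod x 4 with hd
        have hdr : d.toNat ∈ Finset.range 4 := by simp only [Finset.mem_range]; omega
        have hS' : insert d.toNat S ⊆ Finset.range 4 := by
          intro y hy
          rcases Finset.mem_insert.mp hy with h1 | h1
          · subst h1; exact hdr
          · exact hS h1
        rw [MSK1 S (Finset.mem_powerset.mpr hS) d.toNat hdr,
            ih (PySem.Int.floordiv x 4).toNat (by have := pv_div4_lt x h; omega) _ rfl _ hS',
            qsetF_pos x h, ← hd, Finset.insert_union, Finset.union_insert]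
      · rw [sigLoop, dif_neg (by omega), qsetF_nonpos x (by omega), Finset.union_empty]
  exact H _ x rfl

theorem maskOf_empty : maskOf ∅ = 0 := by simp [maskOf]

theorem sigB_mask (x : Int) : sigB x = maskOf (ssetF x) := by
  by_cases h : x ≤ 0
  · rw [sigB, if_pos h, ssetF_nonpos x h, maskOf_empty]
  · rw [sigB, if_neg h]
    obtain ⟨hs, hp, hm⟩ := sigStrip_facts x (by omega)
    rw [show (0 : Int) = maskOf ∅ from maskOf_empty.symm,
        sigLoop_mask _ ∅ (by intro y hy; simp at hy), Finset.empty_union, ← hs,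
        ssetF_pos_ne _ hp hm]

theorem ssetF_mem_pow (x : Int) : ssetF x ∈ (Finset.range 4).powerset :=
  Finset.mem_powerset.mpr (ssetF_sub x)

theorem sigB_bounds (x : Int) : 0 ≤ sigB x ∧ sigB x < 16 := by
  rw [sigB_mask]; exact MSK3 _ (ssetF_mem_pow x)

-- ---- histogram bookkeeping ----

theorem histo_nil : histo [] = List.replicate 16 (0 : Int) := by decide

theorem histo_length (pre : List Int) : (histo pre).length = 16 := by simp [histo]

theorem histo_get (pre : List Int) (s : Int) (h0 : 0 ≤ s) (h1 : s < 16) :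
    PySem.List.pyGetD (histo pre) s 0 = (pre.countP (fun y => sigB y == s) : Int) := by
  rw [PySem.List.pyGetD_eq_getElem _ 0 h0 (by rw [histo_length]; omega)]
  simp only [histo, List.getElem_map, List.getElem_range]
  rw [show ((s.toNat : ℕ) : Int) = s by omega]

theorem histo_getElem (pre : List Int) (k : ℕ) (hk : k < (histo pre).length) :
    (histo pre)[k] = (pre.countP (fun y => sigB y == ((k : ℕ) : Int)) : Int) := by
  simp [histo]

theorem histo_snoc (pre : List Int) (y : Int) :
    PySem.List.pySetD (histo pre) (sigB y) (PySem.List.pyGetD (histo pre) (sigB y) 0 + 1)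
      = histo (pre ++ [y]) := by
  obtain ⟨hm0, hm1⟩ := sigB_bounds y
  rw [PySem.List.pySetD_of_nonneg _ _ hm0]
  apply List.ext_getElem
  · rw [List.length_set, histo_length, histo_length]
  · intro k hk hk'
    rw [List.length_set, histo_length] at hk
    rw [List.getElem_set, histo_getElem (pre ++ [y]) k hk', List.countP_append]
    by_cases hke : (sigB y).toNat = k
    · have hyy : sigB y = ((k : ℕ) : Int) := by omega
      have h1 : List.countP (fun z => sigB z == ((k : ℕ) : Int)) [y] = 1 := by
        simp [hyy]
      rw [if_pos hke, histo_get pre (sigB y) hm0 hm1, hyy, h1]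
      push_cast
      ring
    · have hyy : (sigB y == ((k : ℕ) : Int)) = false := by
        simp only [beq_eq_false_iff_ne, ne_eq]
        omega
      have h1 : List.countP (fun z => sigB z == ((k : ℕ) : Int)) [y] = 0 := by
        simp [hyy]
      rw [if_neg hke, histo_getElem pre k (by rw [histo_length]; omega), h1]
      push_cast
      ring

-- ---- the inner sums and counts ----

theorem sum_hist (x : Int) (pre : List Int) :
    ((PySem.List.pyRange 0 16 1).map (fun s =>
      if PySem.Int.band (sigB x) s == sigB x then (pre.countP (fun y => sigB y == s) : Int) else 0)).sum
      = (pre.countP (fun y => PySem.Int.band (sigB x) (sigB y) == sigB x) : Int) := by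
  induction pre with
  | nil => simp
  | cons y pre ih =>
    rw [List.countP_cons]
    have hsplit : ∀ s : Int,
        (if PySem.Int.band (sigB x) s == sigB x then
          (((y :: pre).countP (fun y => sigB y == s)) : Int) else 0)
        = (if PySem.Int.band (sigB x) s == sigB x then (pre.countP (fun y => sigB y == s) : Int) else 0)
          + (if PySem.Int.band (sigB x) s == sigB x then (if sigB y == s then (1 : Int) else 0) else 0) := by
      intro s
      rw [List.countP_cons]
      by_cases hc : (PySem.Int.band (sigB x) s == sigB x) = true <;>
        by_cases hy : (sigB y == s) = true <;>
          simp [hc, hy]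
    have hmap := List.map_congr_left (l := PySem.List.pyRange 0 16 1) (fun s _ => hsplit s)
    rw [hmap, PySem.List.sum_map_add_int, ih]
    have hspike := MSK4 (ssetF x) (ssetF_mem_pow x) (ssetF y) (ssetF_mem_pow y)
    rw [← sigB_mask, ← sigB_mask] at hspike
    rw [hspike]
    by_cases hb : (PySem.Int.band (sigB x) (sigB y) == sigB x) = true
    · rw [if_pos hb, if_pos hb]
      push_cast
      ring
    · rw [if_neg hb, if_neg hb]
      push_cast
      ring

theorem countP_matches (x : Int) (pre : List Int) :
    pre.countP (fun y => PySem.Int.band (sigB x) (sigB y) == sigB x) = matches_ pre x := by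
  unfold matches_
  apply List.countP_congr
  intro y _
  have h1 := MSK2 (ssetF x) (ssetF_mem_pow x) (ssetF y) (ssetF_mem_pow y)
  rw [← sigB_mask, ← sigB_mask] at h1
  rw [h1]

theorem kB_eq (x : Int) (pre : List Int) :
    (PySem.List.pyRange 0 16 1).foldl (fun k s =>
      if PySem.Int.band (sigB x) s == sigB x then k + PySem.List.pyGetD (histo pre) s 0 else k) 0
    = (matches_ pre x : Int) := by
  have hcong := PySem.List.foldl_congr_mem (PySem.List.pyRange 0 16 1)
    (fun k s => if PySem.Int.band (sigB x) s == sigB x then k + PySem.List.pyGetD (histo pre) s 0 else k)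
    (fun k s => k + (if PySem.Int.band (sigB x) s == sigB x then PySem.List.pyGetD (histo pre) s 0 else 0))
    0
    (by
      intro acc s _
      by_cases hc : (PySem.Int.band (sigB x) s == sigB x) = true <;> simp [hc])
  rw [hcong, PySem.List.foldl_add]
  have hmap := List.map_congr_left (l := PySem.List.pyRange 0 16 1)
    (f := fun s => if PySem.Int.band (sigB x) s == sigB x then PySem.List.pyGetD (histo pre) s 0 else 0)
    (g := fun s => if PySem.Int.band (sigB x) s == sigB x then (pre.countP (fun y => sigB y == s) : Int) else 0)
    (by
      intro s hs
      have hb := PySem.List.mem_pyRange_one.mp hs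
      simp [histo_get pre s hb.1 hb.2])
  rw [hmap, sum_hist, countP_matches]
  omega

theorem cnt_fold (L : List Int) (p : Int → Bool) : ∀ k : ℕ,
    L.foldl (fun c y => if p y then (if c == 0 then c + 2 else c + 1) else c) (gInt k)
      = gInt (k + L.countP p) := by
  induction L with
  | nil => intro k; simp
  | cons y L ih =>
    intro k
    rw [List.foldl_cons, List.countP_cons]
    by_cases hp : p y
    · rw [if_pos hp]
      have hstep : (if (gInt k == 0) = true then gInt k + 2 else gInt k + 1) = gInt (k + 1) := by
        unfold gInt
        by_cases hk : k = 0
        · subst hk; norm_num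
        · rw [if_neg hk]
          rw [if_neg (show ¬ ((((k : Int) + 1) == 0) = true) from by simp; omega)]
          rw [if_neg (show ¬ (k + 1 = 0) from by omega)]
          push_cast
          ring
      rw [hstep, ih (k + 1), if_pos hp]
      congr 1
      omega
    · rw [if_neg hp, ih k, if_neg hp]
      simp

theorem foldl_pyRange_take {β : Type} (T : List Int) (n : ℕ) (hn : n ≤ T.length)
    (g : β → Int → β) (init : β) :
    (PySem.List.pyRange 0 (n : Int) 1).foldl (fun c j => g c (PySem.List.pyGetD T j 0)) init
      = (T.take n).foldl g init := by
  have hlen : ((T.take n).length : Int) = (n : Int) := by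
    simp [List.length_take]
    omega
  have hcong := PySem.List.foldl_congr_mem (PySem.List.pyRange 0 (n : Int) 1)
    (fun c j => g c (PySem.List.pyGetD T j 0))
    (fun c j => g c (PySem.List.pyGetD (T.take n) j 0))
    init
    (by
      intro acc j hj
      have hb := PySem.List.mem_pyRange_one.mp hj
      have e1 : PySem.List.pyGetD T j 0 = PySem.List.pyGetD (T.take n) j 0 := by
        rw [PySem.List.pyGetD_eq_getElem _ 0 hb.1 (by omega),
            PySem.List.pyGetD_eq_getElem _ 0 hb.1 (by rw [hlen]; omega)]
        exact (List.getElem_take).symm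
      simp [e1])
  rw [hcong]
  have h2 := PySem.List.foldl_pyRange_zero_pyGetD (T.take n) 0 g init
  rw [PySem.List.len_eq, hlen] at h2
  exact h2

-- ---- the reference recursion ----

theorem pvRef_nonneg (rest : List Int) : ∀ pre b, 0 ≤ b → 0 ≤ pvRef pre rest b := by
  induction rest with
  | nil => intro pre b hb; exact hb
  | cons x rest ih =>
    intro pre b hb
    apply ih
    split
    · positivity
    · exact hb

theorem pvRef_snoc (rest : List Int) : ∀ pre x b,
    pvRef pre (rest ++ [x]) b =
      (if 0 < (matches_ (pre ++ rest) x : Int) ∧ (matches_ (pre ++ rest) x : Int) + 1 > pvRef pre rest b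
        then (matches_ (pre ++ rest) x : Int) + 1 else pvRef pre rest b) := by
  induction rest with
  | nil =>
    intro pre x b
    simp [pvRef]
  | cons y rest ih =>
    intro pre x b
    show pvRef (pre ++ [y]) (rest ++ [x]) _ = _
    rw [ih]
    simp [pvRef, List.append_assoc]

-- ---- side A equals the reference ----

def pvStepA (T : List Int) (result i : Int) : Int :=
  let n1 := zamien_sys (PySem.List.pyGetD T i 0)
  let cnt := (PySem.List.pyRange 0 i 1).foldl (fun cnt j =>
    let n2 := zamien_sys (PySem.List.pyGetD T j 0)
    if same_digits n1 n2 then (if cnt == 0 then cnt + 2 else cnt + 1) else cnt) 0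
  if cnt > result then cnt else result

theorem cntA_inner (T : List Int) (n : ℕ) (hn : n ≤ T.length) (n1 : Int) :
    (PySem.List.pyRange 0 (n : Int) 1).foldl (fun (cnt : Int) j =>
      if same_digits n1 (zamien_sys (PySem.List.pyGetD T j 0)) then
        (if cnt == 0 then cnt + 2 else cnt + 1) else cnt) (0 : Int)
    = gInt ((T.take n).countP (fun y => same_digits n1 (zamien_sys y))) := by
  have h1 := foldl_pyRange_take T n hn
    (fun (cnt : Int) y => if same_digits n1 (zamien_sys y) then (if cnt == 0 then cnt + 2 else cnt + 1) else cnt) (0 : Int)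
  have h2 := cnt_fold (T.take n) (fun y => same_digits n1 (zamien_sys y)) 0
  rw [Nat.zero_add] at h2
  exact h1.trans h2

theorem gstep (k : ℕ) (b : Int) (hb : 0 ≤ b) :
    (if gInt k > b then gInt k else b)
      = (if 0 < (k : Int) ∧ (k : Int) + 1 > b then (k : Int) + 1 else b) := by
  unfold gInt
  by_cases hk0 : k = 0
  · subst hk0
    rw [if_pos rfl]
    rw [if_neg (show ¬ ((0 : Int) > b) from by omega),
        if_neg (show ¬ (0 < ((0 : ℕ) : Int) ∧ ((0 : ℕ) : Int) + 1 > b) from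
          fun hcon => (by omega : ¬ (0 < ((0 : ℕ) : Int))) hcon.1)]
  · rw [if_neg hk0]
    have hkpos : 0 < ((k : ℕ) : Int) := Int.natCast_pos.mpr (Nat.pos_of_ne_zero hk0)
    by_cases hgt : (k : Int) + 1 > b
    · rw [if_pos hgt, if_pos (And.intro hkpos hgt)]
    · rw [if_neg hgt,
        if_neg (show ¬ (0 < ((k : ℕ) : Int) ∧ ((k : ℕ) : Int) + 1 > b) from fun hcon => hgt hcon.2)]

theorem stepA_eq (T : List Int) (n : ℕ) (hn : n < T.length) (b : Int) (hb : 0 ≤ b) :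
    pvStepA T b (n : Int)
      = (if 0 < (matches_ (T.take n) (T[n]) : Int) ∧ (matches_ (T.take n) (T[n]) : Int) + 1 > b
         then (matches_ (T.take n) (T[n]) : Int) + 1 else b) := by
  have hTn : PySem.List.pyGetD T (n : Int) 0 = T[n] := by
    rw [PySem.List.pyGetD_eq_getElem _ 0 (by omega) (by omega)]
    simp
  unfold pvStepA
  simp only [hTn]
  rw [cntA_inner T n (by omega) (zamien_sys (T[n]))]
  have hk : (T.take n).countP (fun y => same_digits (zamien_sys (T[n])) (zamien_sys y))
      = matches_ (T.take n) (T[n]) :=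
    List.countP_congr (fun y _ => by rw [pred_eq])
  rw [hk]
  exact gstep _ b hb

theorem foldA_eq (T : List Int) : ∀ n : ℕ, n ≤ T.length →
    (PySem.List.pyRange 0 (n : Int) 1).foldl (pvStepA T) 0 = pvRef [] (T.take n) 0 := by
  intro n
  induction n with
  | zero =>
    intro _
    rw [PySem.List.pyRange_one_eq_nil (by omega)]
    simp [pvRef]
  | succ n ih =>
    intro hn
    have hcast : ((n + 1 : ℕ) : Int) = (n : Int) + 1 := by push_cast; ring
    rw [hcast, PySem.List.pyRange_one_succ_right (by omega), List.foldl_append]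
    rw [List.foldl_cons, List.foldl_nil, ih (by omega)]
    have htake : T.take (n + 1) = T.take n ++ [T[n]'(by omega)] := by
      rw [List.take_succ, List.getElem?_eq_getElem (by omega)]
      rfl
    rw [htake, pvRef_snoc, List.nil_append]
    exact stepA_eq T n (by omega) _ (pvRef_nonneg _ _ _ (by omega))

theorem stepA_zero (T : List Int) : pvStepA T 0 0 = 0 := by
  unfold pvStepA
  simp [PySem.List.pyRange_one_eq_nil (le_refl (0 : Int))]

theorem podciag_A_eq_ref (T : List Int) : podciag T = pvRef [] T 0 := by
  have h0 : podciag T = (PySem.List.pyRange 1 (T.length : Int) 1).foldl (pvStepA T) 0 := rfl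
  by_cases hT : T.length = 0
  · rw [h0, hT]
    rw [PySem.List.pyRange_one_eq_nil (by omega)]
    rw [List.length_eq_zero_iff.mp hT]
    rfl
  · have h1 : PySem.List.pyRange 0 (T.length : Int) 1
        = PySem.List.pyRange 0 1 1 ++ PySem.List.pyRange 1 (T.length : Int) 1 :=
      PySem.List.pyRange_one_append 0 1 _ (by omega) (by omega)
    have h2 : PySem.List.pyRange 0 1 1 = [(0 : Int)] := by decide
    have h3 : (PySem.List.pyRange 0 (T.length : Int) 1).foldl (pvStepA T) 0
        = (PySem.List.pyRange 1 (T.length : Int) 1).foldl (pvStepA T) 0 := by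
      rw [h1, List.foldl_append, h2, List.foldl_cons, List.foldl_nil, stepA_zero]
    have h4 := foldA_eq T T.length (le_refl _)
    rw [List.take_length] at h4
    rw [h0, ← h3, h4]

-- ---- side B equals the reference ----

def pvStepB (st : List Int × Int) (x : Int) : List Int × Int :=
  let counts := st.1
  let best := st.2
  let m := sigB x
  let k := (PySem.List.pyRange 0 16 1).foldl (fun k s =>
    if PySem.Int.band m s == m then k + PySem.List.pyGetD counts s 0 else k) 0
  let best' := if 0 < k ∧ k + 1 > best then k + 1 else best
  (PySem.List.pySetD counts m (PySem.List.pyGetD counts m 0 + 1), best')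

theorem stepB_eq (pre : List Int) (b : Int) (x : Int) :
    pvStepB (histo pre, b) x
      = (histo (pre ++ [x]),
         if 0 < (matches_ pre x : Int) ∧ (matches_ pre x : Int) + 1 > b
           then (matches_ pre x : Int) + 1 else b) := by
  unfold pvStepB
  simp only [kB_eq x pre, histo_snoc pre x]

theorem foldB_eq (rest : List Int) : ∀ (pre : List Int) (b : Int),
    (rest.foldl pvStepB (histo pre, b)).2 = pvRef pre rest b := by
  induction rest with
  | nil => intro pre b; rfl
  | cons x rest ih =>
    intro pre b
    rw [List.foldl_cons, stepB_eq, ih]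
    rfl

theorem podciag_B_eq_ref (T : List Int) : podciag_alt T = pvRef [] T 0 := by
  have h0 : podciag_alt T = (T.foldl pvStepB (List.replicate 16 (0 : Int), 0)).2 := rfl
  rw [h0, ← histo_nil, foldB_eq]

-- ===== VERDICT (by name: the statement is the Claim_ definition above) =====
theorem podciag_spec : Claim_equal_podciag := by
  intro T _
  show podciag T = podciag_alt T
  rw [podciag_A_eq_ref, podciag_B_eq_ref]
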